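-- pv_equiv track=rewrite | github.com/civil-ai-study/rccm-quiz-2025 | comprehensive_multi_root_cause_analysis.py | analyze_problem_clusters
-- ===== SOURCE A (Python) =====
-- def analyze_problem_clusters(all_issues):
--     """問題の相互関係クラスター分析"""
--     clusters = {
--         'データ品質クラスター': [],
--         'パフォーマンスクラスター': [],
--         'アーキテクチャクラスター': [],
--         'エラーハンドリングクラスター': []
--     }
--
--     for issue in all_issues:
--         issue_type = issue.get('type', '')
--
--         if any(keyword in issue_type for keyword in ['encoding', 'duplicate', 'quality', 'inconsistent']):
--             clusters['データ品質クラスター'].append(issue)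
--         elif any(keyword in issue_type for keyword in ['excessive', 'memory', 'caching', 'loop']):
--             clusters['パフォーマンスクラスター'].append(issue)
--         elif any(keyword in issue_type for keyword in ['file_size', 'complexity', 'separation', 'module']):
--             clusters['アーキテクチャクラスター'].append(issue)
--         elif any(keyword in issue_type for keyword in ['error', 'exception', 'handling']):
--             clusters['エラーハンドリングクラスター'].append(issue)
--
--     return clusters
-- ===== SOURCE B (Python) =====
-- _TABLE = [
--     ('encoding', 'データ品質クラスター'),
--     ('duplicate', 'データ品質クラスター'),
--     ('quality', 'データ品質クラスター'),
--     ('inconsistent', 'データ品質クラスター'),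
--     ('excessive', 'パフォーマンスクラスター'),
--     ('memory', 'パフォーマンスクラスター'),
--     ('caching', 'パフォーマンスクラスター'),
--     ('loop', 'パフォーマンスクラスター'),
--     ('file_size', 'アーキテクチャクラスター'),
--     ('complexity', 'アーキテクチャクラスター'),
--     ('separation', 'アーキテクチャクラスター'),
--     ('module', 'アーキテクチャクラスター'),
--     ('error', 'エラーハンドリングクラスター'),
--     ('exception', 'エラーハンドリングクラスター'),
--     ('handling', 'エラーハンドリングクラスター'),
-- ]
--
-- _NAMES = ['データ品質クラスター', 'パフォーマンスクラスター',
--           'アーキテクチャクラスター', 'エラーハンドリングクラスター']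
--
--
-- def _cluster_of(issue_type):
--     for keyword, name in _TABLE:
--         if keyword in issue_type:
--             return name
--     return None
--
--
-- def analyze_problem_clusters(all_issues):
--     """問題の相互関係クラスター分析"""
--     return {name: [issue for issue in all_issues
--                    if _cluster_of(issue.get('type', '')) == name]
--             for name in _NAMES}
-- ===== Notes on version B (the rewrite author's own statement) =====
-- stated objective: idiomatic
-- what changed: A's per-issue if/elif chain of four any()-scans appending into a mutated dict is replaced by a classify function that scans one flat keyword-to-cluster table for the first matching keyword, and the result dict is built directly as a comprehension filtering all_issues once per cluster.
import Mathlib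
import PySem

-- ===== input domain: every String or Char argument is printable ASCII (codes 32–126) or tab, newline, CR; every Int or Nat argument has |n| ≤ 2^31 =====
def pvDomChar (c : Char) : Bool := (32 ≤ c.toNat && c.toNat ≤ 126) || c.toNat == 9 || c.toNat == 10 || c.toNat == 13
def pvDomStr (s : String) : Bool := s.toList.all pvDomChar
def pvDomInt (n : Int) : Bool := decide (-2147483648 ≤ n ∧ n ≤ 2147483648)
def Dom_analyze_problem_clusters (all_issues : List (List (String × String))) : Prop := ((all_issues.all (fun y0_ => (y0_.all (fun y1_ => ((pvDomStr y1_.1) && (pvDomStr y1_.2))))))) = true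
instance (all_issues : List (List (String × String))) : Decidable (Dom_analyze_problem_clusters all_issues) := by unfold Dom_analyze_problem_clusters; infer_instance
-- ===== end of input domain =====

-- B replaces A's per-issue elif chain of any() scans by a classify function over one flat
-- keyword→cluster table plus a per-cluster filter comprehension (objective: idiomatic).

-- issue.get('type', '') — shared Python construct of both versions
def pvTypeOf (issue : List (String × String)) : String :=
  (PySem.Dict.ofList issue).getD "type" ""

-- ===== PORT A =====
def pvStepA (d : PySem.Dict String (List (List (String × String))))
    (issue : List (String × String)) : PySem.Dict String (List (List (String × String))) :=
  let issue_type := pvTypeOf issue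
  if (["encoding", "duplicate", "quality", "inconsistent"].any (fun k => PySem.Str.isIn k issue_type)) then
    d.modify "データ品質クラスター" [] (· ++ [issue])
  else if (["excessive", "memory", "caching", "loop"].any (fun k => PySem.Str.isIn k issue_type)) then
    d.modify "パフォーマンスクラスター" [] (· ++ [issue])
  else if (["file_size", "complexity", "separation", "module"].any (fun k => PySem.Str.isIn k issue_type)) then
    d.modify "アーキテクチャクラスター" [] (· ++ [issue])
  else if (["error", "exception", "handling"].any (fun k => PySem.Str.isIn k issue_type)) then
    d.modify "エラーハンドリングクラスター" [] (· ++ [issue])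
  else
    d

def analyze_problem_clusters (all_issues : List (List (String × String))) : List (String × List (List (String × String))) :=
  (all_issues.foldl pvStepA
    (PySem.Dict.mk [("データ品質クラスター", []), ("パフォーマンスクラスター", []),
                    ("アーキテクチャクラスター", []), ("エラーハンドリングクラスター", [])])).items

-- ===== PORT B =====
def pvTable : List (String × String) :=
  [("encoding", "データ品質クラスター"), ("duplicate", "データ品質クラスター"),
   ("quality", "データ品質クラスター"), ("inconsistent", "データ品質クラスター"),
   ("excessive", "パフォーマンスクラスター"), ("memory", "パフォーマンスクラスター"),
   ("caching", "パフォーマンスクラスター"), ("loop", "パフォーマンスクラスター"),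
   ("file_size", "アーキテクチャクラスター"), ("complexity", "アーキテクチャクラスター"),
   ("separation", "アーキテクチャクラスター"), ("module", "アーキテクチャクラスター"),
   ("error", "エラーハンドリングクラスター"), ("exception", "エラーハンドリングクラスター"),
   ("handling", "エラーハンドリングクラスター")]

def pvNames : List String :=
  ["データ品質クラスター", "パフォーマンスクラスター", "アーキテクチャクラスター", "エラーハンドリングクラスター"]

def pvClusterOf (issue_type : String) : Option String :=
  (pvTable.find? (fun p => PySem.Str.isIn p.1 issue_type)).map (·.2)

def analyze_problem_clusters_alt (all_issues : List (List (String × String))) : List (String × List (List (String × String))) :=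
  pvNames.map (fun name =>
    (name, all_issues.filter (fun issue => pvClusterOf (pvTypeOf issue) == some name)))

-- ===== PRECONDITION & SPEC =====
def Spec_analyze_problem_clusters (all_issues : List (List (String × String))) (out : List (String × List (List (String × String)))) : Prop := out = analyze_problem_clusters_alt all_issues
instance (all_issues : List (List (String × String))) (out : List (String × List (List (String × String)))) : Decidable (Spec_analyze_problem_clusters all_issues out) := by unfold Spec_analyze_problem_clusters; infer_instance

-- ===== CLAIM (what is proved, stated in full; the proofs are below) =====
def Claim_equal_analyze_problem_clusters : Prop := ∀ (all_issues : List (List (String × String))), Dom_analyze_problem_clusters all_issues → Spec_analyze_problem_clusters all_issues (analyze_problem_clusters all_issues)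

-- ===== LEMMAS AND PROOFS =====

-- B's first-match scan over the flat table equals A's elif chain of any() scans
theorem pvClusterOf_eq (t : String) :
    pvClusterOf t =
      if (["encoding", "duplicate", "quality", "inconsistent"].any (fun k => PySem.Str.isIn k t)) then
        some "データ品質クラスター"
      else if (["excessive", "memory", "caching", "loop"].any (fun k => PySem.Str.isIn k t)) then
        some "パフォーマンスクラスター"
      else if (["file_size", "complexity", "separation", "module"].any (fun k => PySem.Str.isIn k t)) then
        some "アーキテクチャクラスター"
      else if (["error", "exception", "handling"].any (fun k => PySem.Str.isIn k t)) then
        some "エラーハンドリングクラスター"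
      else none := by
  simp only [pvClusterOf, pvTable, List.find?, List.any, Bool.or_eq_true]
  split_ifs <;> simp_all
  all_goals (repeat' split) <;> simp_all

theorem pv_inv (issues : List (List (String × String)))
    (l1 l2 l3 l4 : List (List (String × String))) :
    issues.foldl pvStepA
      (PySem.Dict.mk [("データ品質クラスター", l1), ("パフォーマンスクラスター", l2),
                      ("アーキテクチャクラスター", l3), ("エラーハンドリングクラスター", l4)])
    = PySem.Dict.mk
        [("データ品質クラスター", l1 ++ issues.filter (fun i => pvClusterOf (pvTypeOf i) == some "データ品質クラスター")),
         ("パフォーマンスクラスター", l2 ++ issues.filter (fun i => pvClusterOf (pvTypeOf i) == some "パフォーマンスクラスター")),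
         ("アーキテクチャクラスター", l3 ++ issues.filter (fun i => pvClusterOf (pvTypeOf i) == some "アーキテクチャクラスター")),
         ("エラーハンドリングクラスター", l4 ++ issues.filter (fun i => pvClusterOf (pvTypeOf i) == some "エラーハンドリングクラスター"))] := by
  induction issues generalizing l1 l2 l3 l4 with
  | nil => simp
  | cons i rest ih =>
    have hc := pvClusterOf_eq (pvTypeOf i)
    simp only [List.foldl_cons, List.filter_cons, pvStepA]
    split_ifs at hc ⊢ <;>
      simp_all [PySem.Dict.modify, PySem.Dict.insert, PySem.Dict.getD, PySem.Dict.get?,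
                PySem.Dict.contains, List.find?]

-- ===== VERDICT (by name: the statement is the Claim_ definition above) =====
theorem analyze_problem_clusters_spec : Claim_equal_analyze_problem_clusters := by
  intro all_issues _
  unfold Spec_analyze_problem_clusters analyze_problem_clusters analyze_problem_clusters_alt pvNames
  rw [pv_inv]
  simp
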